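-- pv_equiv track=rewrite | github.com/Iwanap1/Zeolite_TDM | corpus_acquisition/elsevier_parser.py | flatten_headers
-- ===== SOURCE A (Python) =====
-- def flatten_headers(headers):
--     if not headers or len(headers) == 1:
--         return headers[0] if headers else []
--
--     num_rows = len(headers)
--     num_cols = len(headers[0])
--     flattened = []
--
--     for col in range(num_cols):
--         parts = []
--         for row in range(num_rows):
--             entry = headers[row][col].strip()
--             if entry and (not parts or entry != parts[-1]):
--                 parts.append(entry)
--         flattened.append(" | ".join(parts).strip())
--     return flattened
-- ===== SOURCE B (Python) =====
-- def flatten_headers(headers):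
--     if not headers or len(headers) == 1:
--         return headers[0] if headers else []
--     # Single row-major pass: per column keep only (joined-so-far, last-kept-entry),
--     # building the joined string incrementally instead of collecting parts per column.
--     acc = [("", "") for _ in headers[0]]
--     for row in headers:
--         new = []
--         for (joined, last), cell in zip(acc, row):
--             e = cell.strip()
--             if e and e != last:
--                 joined = e if not joined else joined + " | " + e
--                 last = e
--             new.append((joined, last))
--         acc = new
--     return [joined.strip() for joined, _ in acc]
-- ===== Notes on version B (the rewrite author's own statement) =====
-- stated objective: alternative
-- what changed: Replaced A's column-major nested loops that collect a parts list per column and join it at the end by a single row-major pass that keeps, for every column, only a running joined string and the last kept entry, building each output string incrementally.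
-- outside the precondition, e.g. on flatten_headers([['a', 'b'], ['c']]): A raises IndexError, B returns ['a | c']
import Mathlib
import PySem

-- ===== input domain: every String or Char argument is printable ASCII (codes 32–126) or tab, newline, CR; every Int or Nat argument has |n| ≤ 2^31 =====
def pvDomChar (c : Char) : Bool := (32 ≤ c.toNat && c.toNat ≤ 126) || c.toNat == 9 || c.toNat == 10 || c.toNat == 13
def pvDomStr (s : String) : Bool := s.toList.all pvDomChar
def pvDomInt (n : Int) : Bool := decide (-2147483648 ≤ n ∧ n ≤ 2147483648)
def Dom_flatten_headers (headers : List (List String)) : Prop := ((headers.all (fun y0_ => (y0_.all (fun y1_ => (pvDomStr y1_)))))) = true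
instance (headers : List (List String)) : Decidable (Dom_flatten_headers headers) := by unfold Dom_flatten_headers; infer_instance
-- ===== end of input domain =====

-- B replaces A's column-major nested loops (collect a parts list per column, join at the end)
-- by ONE row-major pass that keeps, per column, only a running joined string and the last kept
-- entry, building each output string incrementally; same cost, different traversal and state.

-- ===== PORT A =====
def flatten_headers (headers : List (List String)) : List String :=
  if headers = [] ∨ headers.length = 1 then
    (if headers ≠ [] then PySem.List.pyGetD headers 0 [] else [])
  else
    let num_rows : Int := headers.length
    let num_cols : Int := (PySem.List.pyGetD headers 0 []).length
    (PySem.List.pyRange 0 num_cols 1).foldl (fun flattened col =>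
      let parts := (PySem.List.pyRange 0 num_rows 1).foldl (fun parts row =>
        let entry := PySem.Str.strip (PySem.List.pyGetD (PySem.List.pyGetD headers row []) col "")
        if entry ≠ "" ∧ (parts = [] ∨ entry ≠ PySem.List.pyGetD parts (-1) "") then
          parts ++ [entry]
        else parts) ([] : List String)
      flattened ++ [PySem.Str.strip (PySem.Str.join " | " parts)]) []

-- ===== PORT B =====
-- per-column state (joined, last): one cell of one row folded in
def bstep (s : String × String) (cell : String) : String × String :=
  let e := PySem.Str.strip cell
  if e ≠ "" ∧ e ≠ s.2 then
    ((if s.1 = "" then e else s.1 ++ " | " ++ e), e)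
  else s

def flatten_headers_alt (headers : List (List String)) : List String :=
  if headers = [] ∨ headers.length = 1 then
    (if headers ≠ [] then PySem.List.pyGetD headers 0 [] else [])
  else
    let acc0 : List (String × String) := (headers.headD []).map (fun _ => ("", ""))
    let acc := headers.foldl
      (fun acc row => (acc.zip row).map (fun p => bstep p.1 p.2)) acc0
    acc.map (fun p => PySem.Str.strip p.1)

-- ===== PRECONDITION & SPEC =====
-- Pre_ excludes exactly the inputs where A raises IndexError: two or more rows with some
-- row shorter than the first row (A indexes every row at each column of row 0).
def Pre_flatten_headers (headers : List (List String)) : Prop :=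
  headers.length ≤ 1 ∨ ∀ r ∈ headers, (headers.headD []).length ≤ r.length
instance (headers : List (List String)) : Decidable (Pre_flatten_headers headers) := by
  unfold Pre_flatten_headers; infer_instance
def pvWitness_flatten_headers : List (List String) := [["a", " b"], ["a", "c"]]

def Spec_flatten_headers (headers : List (List String)) (out : List String) : Prop :=
  out = flatten_headers_alt headers
instance (headers : List (List String)) (out : List String) : Decidable (Spec_flatten_headers headers out) := by
  unfold Spec_flatten_headers; infer_instance

-- ===== CLAIM (what is proved, stated in full; the proofs are below) =====
def Claim_equal_flatten_headers : Prop := ∀ (headers : List (List String)), Dom_flatten_headers headers → Pre_flatten_headers headers → Spec_flatten_headers headers (flatten_headers headers)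

-- ===== LEMMAS AND PROOFS =====

-- A's inner-loop step on a parts list
def gstep (parts : List String) (entry : String) : List String :=
  if entry ≠ "" ∧ (parts = [] ∨ entry ≠ PySem.List.pyGetD parts (-1) "") then
    parts ++ [entry]
  else parts

def Jn (parts : List String) : String := PySem.Str.join " | " parts
def Ln (parts : List String) : String := PySem.List.pyGetD parts (-1) ""

theorem chars_join_append (sep s : List Char) : ∀ (x : List Char) (t : List (List Char)),
    PySem.Chars.join sep (x :: (t ++ [s])) = PySem.Chars.join sep (x :: t) ++ sep ++ s := by
  intro x t
  induction t generalizing x with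
  | nil => rw [List.nil_append, PySem.Chars.join_cons_cons,
      PySem.Chars.join_singleton, PySem.Chars.join_singleton]
  | cons y t' ih =>
    rw [List.cons_append, PySem.Chars.join_cons_cons, ih y, PySem.Chars.join_cons_cons]
    simp [List.append_assoc]

theorem Jn_append (x : String) (t : List String) (s : String) :
    Jn ((x :: t) ++ [s]) = Jn (x :: t) ++ " | " ++ s := by
  apply String.toList_inj.mp
  simp only [String.toList_append, Jn, PySem.Str.toList_join, List.map_append, List.map_cons,
    List.map_nil, List.cons_append]
  exact chars_join_append _ _ _ _

theorem Jn_singleton (x : String) : Jn [x] = x := by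
  apply String.toList_inj.mp
  simp only [Jn, PySem.Str.toList_join, List.map_cons, List.map_nil, PySem.Chars.join_singleton]

theorem Ln_singleton (x : String) : Ln [x] = x := by
  rw [Ln, show [x] = [] ++ [x] from rfl, PySem.List.pyGetD_neg_one_append_singleton]

theorem Ln_append (xs : List String) (x : String) : Ln (xs ++ [x]) = x := by
  rw [Ln, PySem.List.pyGetD_neg_one_append_singleton]

theorem Jn_cons_ne (x : String) (t : List String) (hx : x ≠ "") : Jn (x :: t) ≠ "" := by
  intro h
  have hx' : x.toList ≠ [] := fun hh => hx (String.toList_inj.mp (by simpa using hh))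
  have h' := congrArg String.toList h
  rw [Jn, PySem.Str.toList_join, List.map_cons] at h'
  cases t with
  | nil =>
    rw [List.map_nil, PySem.Chars.join_singleton] at h'
    exact hx' (by simpa using h')
  | cons y t' =>
    rw [List.map_cons, PySem.Chars.join_cons_cons] at h'
    have hlen := congrArg List.length h'
    simp at hlen

-- one cell of one row: B's pair step is A's list step through (Jn, Ln)
theorem bstep_JnLn (parts : List String) (cell : String) (hp : ∀ p ∈ parts, p ≠ "") :
    bstep (Jn parts, Ln parts) cell
      = (Jn (gstep parts (PySem.Str.strip cell)), Ln (gstep parts (PySem.Str.strip cell))) := by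
  simp only [bstep, gstep]
  generalize PySem.Str.strip cell = e
  cases parts with
  | nil =>
    have hL : Ln ([] : List String) = "" := rfl
    have hJ : Jn ([] : List String) = "" := rfl
    by_cases he : e = ""
    · rw [if_neg (by simp [he]), if_neg (by simp [he])]
    · rw [hL, hJ, if_pos ⟨he, he⟩, if_pos rfl,
        if_pos (show e ≠ "" ∧ (([] : List String) = [] ∨ e ≠ PySem.List.pyGetD [] (-1) "")
          from ⟨he, Or.inl rfl⟩),
        List.nil_append, Jn_singleton, Ln_singleton]
  | cons x t =>
    have hcond : (e ≠ "" ∧ e ≠ Ln (x :: t)) ↔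
        (e ≠ "" ∧ (x :: t = [] ∨ e ≠ PySem.List.pyGetD (x :: t) (-1) "")) := by
      unfold Ln; simp
    by_cases hc : e ≠ "" ∧ e ≠ Ln (x :: t)
    · rw [if_pos hc, if_pos (hcond.mp hc),
        if_neg (Jn_cons_ne x t (hp x List.mem_cons_self)),
        Jn_append, Ln_append]
    · rw [if_neg hc, if_neg (fun hh => hc (hcond.mpr hh))]

-- invariant: B's per-column pair is A's (joined parts, last part)
theorem col_inv : ∀ (cells : List String) (parts : List String), (∀ p ∈ parts, p ≠ "") →
    cells.foldl bstep (Jn parts, Ln parts)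
      = (Jn (cells.foldl (fun ps cell => gstep ps (PySem.Str.strip cell)) parts),
         Ln (cells.foldl (fun ps cell => gstep ps (PySem.Str.strip cell)) parts)) := by
  intro cells
  induction cells with
  | nil => intro parts _; rfl
  | cons cell rest ih =>
    intro parts hparts
    simp only [List.foldl_cons]
    rw [bstep_JnLn parts cell hparts, ih _ ?_]
    intro p hp
    unfold gstep at hp
    split at hp
    · rcases List.mem_append.mp hp with h | h
      · exact hparts p h
      · rename_i hcond
        rcases List.mem_singleton.mp h with rfl
        exact hcond.1
    · exact hparts p hp

-- B's row-major step over the whole state list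
def rstep (acc : List (String × String)) (row : List String) : List (String × String) :=
  (acc.zip row).map (fun p => bstep p.1 p.2)

theorem rstep_getElem (acc : List (String × String)) (row : List String)
    (hlen : acc.length ≤ row.length) (c : Nat) (hc : c < acc.length) :
    (rstep acc row).getD c ("", "") = bstep (acc.getD c ("", "")) (row.getD c "") := by
  have hz : c < (acc.zip row).length := by simp [List.length_zip]; omega
  have hr : c < row.length := by omega
  rw [rstep, List.getD_eq_getElem _ _ (by simpa using hz),
    List.getElem_map, List.getElem_zip,
    List.getD_eq_getElem _ _ hc, List.getD_eq_getElem _ _ hr]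

theorem length_rstep (acc : List (String × String)) (row : List String)
    (hlen : acc.length ≤ row.length) : (rstep acc row).length = acc.length := by
  simp [rstep, List.length_zip]; omega

-- exchange: the row-major fold computes each column's fold independently
theorem exchange : ∀ (rows : List (List String)) (acc : List (String × String)),
    (∀ r ∈ rows, acc.length ≤ r.length) →
    rows.foldl rstep acc
      = (List.range acc.length).map
          (fun c => rows.foldl (fun s row => bstep s (row.getD c "")) (acc.getD c ("", ""))) := by
  intro rows
  induction rows with
  | nil =>
    intro acc _
    apply List.ext_getElem (by simp)
    intro i h1 h2
    simp only [List.foldl_nil] at h1 ⊢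
    rw [List.getElem_map, List.getElem_range, List.getD_eq_getElem _ _ h1]
  | cons row rest ih =>
    intro acc h
    have hlen : acc.length ≤ row.length := h row (List.mem_cons_self)
    rw [List.foldl_cons, ih (rstep acc row) (by
      intro r hr
      rw [length_rstep acc row hlen]
      exact h r (List.mem_cons_of_mem _ hr)), length_rstep acc row hlen]
    simp only [List.foldl_cons]
    apply List.map_congr_left
    intro c hc
    rw [rstep_getElem acc row hlen c (List.mem_range.mp hc)]

-- ===== VERDICT (by name: the statement is the Claim_ definition above) =====
theorem flatten_headers_spec : Claim_equal_flatten_headers := by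
  intro headers _ hpre
  unfold Spec_flatten_headers flatten_headers flatten_headers_alt
  unfold Pre_flatten_headers at hpre
  by_cases hguard : headers = [] ∨ headers.length = 1
  · simp only [hguard, if_pos]
  · rw [if_neg hguard, if_neg hguard]
    obtain ⟨h, t, rfl⟩ : ∃ h t, headers = h :: t := by
      cases headers with
      | nil => exact absurd (Or.inl rfl) hguard
      | cons a b => exact ⟨a, b, rfl⟩
    have hpre' : ∀ r ∈ h :: t, h.length ≤ r.length := by
      rcases hpre with h1 | h2
      · exfalso; apply hguard
        cases t with
        | nil => exact Or.inr rfl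
        | cons => simp at h1
      · simpa using h2
    simp only [List.headD_cons]
    -- A side: turn the range-fold into a map over columns
    rw [PySem.List.foldl_append_singleton_eq_map]
    simp only [PySem.List.pyGetD_zero, List.getD_cons_zero, List.nil_append]
    rw [PySem.List.pyRange_zero_nat h.length]
    -- B side: fold the step back into rstep and exchange rows and columns
    rw [show (fun (acc : List (String × String)) (row : List String) =>
        (acc.zip row).map (fun p => bstep p.1 p.2)) = rstep from rfl]
    have hlen0 : (h.map (fun _ => (("", "") : String × String))).length = h.length := by simp
    rw [exchange (h :: t) (h.map (fun _ => ("", "")))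
      (by intro r hr; rw [hlen0]; exact hpre' r hr), hlen0]
    rw [List.map_map, List.map_map]
    apply List.map_congr_left
    intro c hc
    have hc' : c < h.length := List.mem_range.mp hc
    simp only [Function.comp_apply]
    -- B's column-c fold: start is ("", "") = (Jn [], Ln [])
    have hstart : (h.map (fun _ => (("", "") : String × String))).getD c ("", "") = ("", "") := by
      rw [List.getD_eq_getElem _ _ (by simpa using hc'), List.getElem_map]
    rw [hstart]
    -- turn the fold over rows into a fold over cells, then apply the invariant
    have hB : (h :: t).foldl (fun s row => bstep s (row.getD c "")) ("", "")
        = ((h :: t).map (fun r => r.getD c "")).foldl bstep ("", "") := by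
      rw [List.foldl_map]
    have hinv := col_inv ((h :: t).map (fun r => r.getD c "")) [] (by simp)
    have hnil : ((Jn [], Ln []) : String × String) = ("", "") := rfl
    rw [hB, ← hnil, hinv]
    -- A's column-c inner loop is the same gstep fold over the same cells
    refine congrArg PySem.Str.strip ?_
    show PySem.Str.join " | " _ = Jn _
    unfold Jn
    refine congrArg (PySem.Str.join " | ") ?_
    rw [PySem.List.foldl_pyRange_zero_pyGetD' (h :: t) ([] : List String)
      (fun parts (r : List String) =>
        if PySem.Str.strip (PySem.List.pyGetD r (↑c) "") ≠ "" ∧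
            (parts = [] ∨
              PySem.Str.strip (PySem.List.pyGetD r (↑c) "") ≠ PySem.List.pyGetD parts (-1) "") then
          parts ++ [PySem.Str.strip (PySem.List.pyGetD r (↑c) "")]
        else parts) []]
    have hgd : ∀ (r : List String), PySem.List.pyGetD r (c : Int) "" = r.getD c "" := by
      intro r; simp
    simp only [hgd]
    have hstep : (fun (parts : List String) (r : List String) =>
        if PySem.Str.strip (r.getD c "") ≠ "" ∧
            (parts = [] ∨ PySem.Str.strip (r.getD c "") ≠ PySem.List.pyGetD parts (-1) "") then
          parts ++ [PySem.Str.strip (r.getD c "")]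
        else parts) =
        fun (parts : List String) (r : List String) => gstep parts (PySem.Str.strip (r.getD c "")) := rfl
    rw [hstep, List.foldl_map]
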